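-- pv_equiv track=rewrite | github.com/Pengchengpcx/Suicidality-in-Social-Media | HAN/load_data.py | words2index
-- ===== SOURCE A (Python) =====
-- max_words = 80 #max number of words per post
--
-- def words2index(tokens, vocab):
--     words = tokens.split(',')
--     words_index = []
--     for i in range(max_words):
--         if i < len(words):
--             words_index.append(vocab.get(words[i],0))
--         else:
--             words_index.append(0)
--
--     return words_index
-- ===== SOURCE B (Python) =====
-- max_words = 80 #max number of words per post
--
-- def words2index(tokens, vocab):
--     def go(ws, slots):
--         if slots == 0:
--             return []
--         if not ws:
--             return [0] * slots
--         return [vocab.get(ws[0], 0)] + go(ws[1:], slots - 1)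
--     return go(tokens.split(','), max_words)
-- ===== Notes on version B (the rewrite author's own statement) =====
-- stated objective: alternative
-- what changed: A's fixed range(80) loop with a per-position index-vs-length branch is replaced by a structural recursion that consumes the token list and a slot counter together and zero-fills all remaining slots at once when the tokens run out.
import Mathlib
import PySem

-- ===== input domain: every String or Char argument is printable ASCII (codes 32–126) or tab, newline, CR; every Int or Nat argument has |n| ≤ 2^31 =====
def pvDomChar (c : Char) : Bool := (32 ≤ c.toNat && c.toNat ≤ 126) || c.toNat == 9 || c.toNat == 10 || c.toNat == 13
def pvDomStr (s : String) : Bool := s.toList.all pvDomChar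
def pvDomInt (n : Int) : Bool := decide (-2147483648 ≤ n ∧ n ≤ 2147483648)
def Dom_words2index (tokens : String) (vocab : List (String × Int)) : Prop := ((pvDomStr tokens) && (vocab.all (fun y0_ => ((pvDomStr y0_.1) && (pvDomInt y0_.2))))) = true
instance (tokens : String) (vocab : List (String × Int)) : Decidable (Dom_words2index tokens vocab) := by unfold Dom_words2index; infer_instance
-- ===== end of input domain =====

-- B replaces A's fixed range(80) loop with its per-position branch by a structural
-- recursion consuming the token list and a slot counter together, zero-filling the
-- remaining slots at once when tokens run out (objective: alternative).

-- ===== PORT A =====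
def words2index (tokens : String) (vocab : List (String × Int)) : List Int :=
  let words := (PySem.Str.split? tokens ",").getD []
  (PySem.List.pyRange 0 80 1).foldl
    (fun acc i =>
      if i < (words.length : Int) then
        acc ++ [PySem.Dict.getD (PySem.Dict.mk vocab) (PySem.List.pyGetD words i "") 0]
      else
        acc ++ [0]) []

-- ===== PORT B =====
-- B's inner recursive helper go(ws, slots)
def words2indexGo (vocab : List (String × Int)) : List String → Nat → List Int
  | _, 0 => []
  | [], Nat.succ k => List.replicate (Nat.succ k) 0
  | w :: ws, Nat.succ k =>
      PySem.Dict.getD (PySem.Dict.mk vocab) w 0 :: words2indexGo vocab ws k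

def words2index_alt (tokens : String) (vocab : List (String × Int)) : List Int :=
  words2indexGo vocab ((PySem.Str.split? tokens ",").getD []) 80

-- ===== PRECONDITION & SPEC =====
def Spec_words2index (tokens : String) (vocab : List (String × Int)) (out : List Int) : Prop := out = words2index_alt tokens vocab
instance (tokens : String) (vocab : List (String × Int)) (out : List Int) : Decidable (Spec_words2index tokens vocab out) := by unfold Spec_words2index; infer_instance

-- ===== CLAIM (what is proved, stated in full; the proofs are below) =====
def Claim_equal_words2index : Prop := ∀ (tokens : String) (vocab : List (String × Int)), Dom_words2index tokens vocab → Spec_words2index tokens vocab (words2index tokens vocab)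

-- ===== LEMMAS AND PROOFS =====

-- A's mapped-range result, for an arbitrary element list.
theorem pv_key (n : Nat) (xs : List Int) :
    (PySem.List.pyRange 0 n 1).map
      (fun i => if i < (xs.length : Int) then PySem.List.pyGetD xs i 0 else 0)
    = xs.take n ++ List.replicate (n - xs.length) 0 := by
  apply List.ext_getElem
  · simp [PySem.List.length_pyRange_one]; omega
  · intro k hk hk'
    have hkn : k < n := by simpa [PySem.List.length_pyRange_one] using hk
    rw [List.getElem_map, PySem.List.getElem_pyRange_one]
    by_cases h : k < xs.length
    · rw [List.getElem_append_left (by simp; omega)]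
      simp [h, PySem.List.pyGetD_natCast, List.getD_eq_getElem?_getD,
        List.getElem_take]
    · rw [List.getElem_append_right (by simp; omega)]
      simp
      exact fun hc => absurd hc h

-- B's recursion computes the same take-and-pad value over the mapped list.
theorem pv_go (vocab : List (String × Int)) (ws : List String) (n : Nat) :
    words2indexGo vocab ws n
      = ((ws.map (fun w => PySem.Dict.getD (PySem.Dict.mk vocab) w 0)).take n)
        ++ List.replicate (n - ws.length) 0 := by
  induction n generalizing ws with
  | zero => simp [words2indexGo]
  | succ k ih =>
    cases ws with
    | nil => simp [words2indexGo]
    | cons w ws => simp [words2indexGo, ih, Nat.succ_sub_succ]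

theorem words2index_eq (tokens : String) (vocab : List (String × Int)) :
    words2index tokens vocab = words2index_alt tokens vocab := by
  unfold words2index words2index_alt
  set ws := (PySem.Str.split? tokens ",").getD [] with hws
  set xs := ws.map (fun w => PySem.Dict.getD (PySem.Dict.mk vocab) w 0) with hxs
  -- A's loop body appends exactly one element each iteration
  have hbody : (fun (acc : List Int) (i : Int) =>
      if i < (ws.length : Int) then
        acc ++ [PySem.Dict.getD (PySem.Dict.mk vocab) (PySem.List.pyGetD ws i "") 0]
      else acc ++ [0])
      = fun acc i => acc ++ [if i < (ws.length : Int) then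
          PySem.Dict.getD (PySem.Dict.mk vocab) (PySem.List.pyGetD ws i "") 0 else 0] := by
    funext acc i; split_ifs <;> rfl
  simp only [hbody, PySem.List.foldl_append_singleton_eq_map, List.nil_append]
  -- on in-range indices the looked-up word equals the premapped element
  have hcongr : (PySem.List.pyRange 0 80 1).map
      (fun i => if i < (ws.length : Int) then
        PySem.Dict.getD (PySem.Dict.mk vocab) (PySem.List.pyGetD ws i "") 0 else 0)
      = (PySem.List.pyRange 0 80 1).map
      (fun i => if i < (xs.length : Int) then PySem.List.pyGetD xs i 0 else 0) := by
    apply List.map_congr_left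
    intro i hi
    have h0 : 0 ≤ i := ((PySem.List.mem_pyRange_one).1 hi).1
    obtain ⟨k, rfl⟩ := Int.eq_ofNat_of_zero_le h0
    have hlen : xs.length = ws.length := by simp [hxs]
    by_cases h : (k : Int) < (ws.length : Int)
    · have hk : k < ws.length := by exact_mod_cast h
      simp [h, PySem.List.pyGetD_natCast, List.getD_eq_getElem?_getD,
        List.getElem?_eq_getElem hk, hxs, List.getElem?_map]
    · simp [h, hlen]
  rw [hcongr]
  conv_lhs => rw [show (80 : Int) = ((80 : Nat) : Int) from by norm_num]
  rw [pv_key 80 xs]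
  rw [pv_go vocab ws 80, hxs]; simp

-- ===== VERDICT (by name: the statement is the Claim_ definition above) =====
theorem words2index_spec : Claim_equal_words2index := by
  intro tokens vocab _
  exact words2index_eq tokens vocab
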